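-- pv_equiv track=rewrite | github.com/Casper-Guo/vigenere-cipher-demo | utils.py | find_identical
-- ===== SOURCE A (Python) =====
-- def find_identical(ciphered, word_length):
--     """Find identical letter sequences of a certain length."""
--     sequences = {}
--
--     for i in range(0, len(ciphered) - word_length + 1):
--         segment = ciphered[i:i + word_length]
--
--         if segment in sequences:
--             sequences[segment].append(i)
--         else:
--             sequences[segment] = [i]
--
--     repeated = [item for item in sequences.items() if len(item[1]) > 2]
--     return sorted(repeated, key=lambda x: len(x[1]), reverse=True)
-- ===== SOURCE B (Python) =====
-- def find_identical(ciphered, word_length):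
--     """Find identical letter sequences of a certain length."""
--     # Sort-then-scan instead of hashing: sort the (window, position) pairs,
--     # equal windows become consecutive runs; then order groups by
--     # (-frequency, first position), which reproduces the stable frequency sort.
--     keyed = sorted((ciphered[i:i + word_length], i)
--                    for i in range(len(ciphered) - word_length + 1))
--     groups = []
--     j = 0
--     while j < len(keyed):
--         seg = keyed[j][0]
--         k = j
--         while k < len(keyed) and keyed[k][0] == seg:
--             k += 1
--         if k - j > 2:
--             groups.append((seg, [p for _, p in keyed[j:k]]))
--         j = k
--     groups.sort(key=lambda g: (-len(g[1]), g[1][0]))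
--     return groups
-- ===== Notes on version B (the rewrite author's own statement) =====
-- stated objective: alternative
-- what changed: B replaces A's hash-dict grouping plus stable frequency sort by sort-then-scan: it sorts the (window, position) pairs so equal windows become consecutive runs, collects the runs, and orders the kept groups by the strict key (-frequency, first position), which coincides with A's stable sort by frequency.
import Mathlib
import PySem

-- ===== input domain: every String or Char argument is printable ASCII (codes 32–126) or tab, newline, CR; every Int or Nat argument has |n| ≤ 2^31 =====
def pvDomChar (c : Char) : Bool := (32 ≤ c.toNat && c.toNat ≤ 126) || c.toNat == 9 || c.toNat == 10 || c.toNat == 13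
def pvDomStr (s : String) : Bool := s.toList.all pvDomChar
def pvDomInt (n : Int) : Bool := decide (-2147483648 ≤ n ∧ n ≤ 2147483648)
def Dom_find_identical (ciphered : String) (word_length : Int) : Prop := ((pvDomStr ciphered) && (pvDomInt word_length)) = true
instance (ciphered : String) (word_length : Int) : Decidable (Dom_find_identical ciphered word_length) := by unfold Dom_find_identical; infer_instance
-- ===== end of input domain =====

-- B replaces A's hash-dict grouping + stable frequency sort by sort-then-scan: it sorts the
-- (window, position) pairs, collects equal windows as consecutive runs, and orders the kept
-- groups by the strict key (-frequency, first position); same return value, different algorithm.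

-- ===== PORT A =====
def find_identical (ciphered : String) (word_length : Int) : List (String × List Int) :=
  let sequences :=
    (PySem.List.pyRange 0 (PySem.Str.len ciphered - word_length + 1) 1).foldl
      (fun (d : PySem.Dict String (List Int)) i =>
        let segment := PySem.Str.slice ciphered (some i) (some (i + word_length))
        if d.contains segment then
          -- sequences[segment].append(i)
          d.modify segment [] (fun v => v ++ [i])
        else
          d.insert segment [i])
      PySem.Dict.empty
  let repeated := sequences.items.filter (fun item => PySem.List.len item.2 > 2)
  PySem.List.sorted repeated (fun x => PySem.List.len x.2) true

-- ===== PORT B =====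
-- the run-collecting while loop of Source B: take the run of the head's window, keep it if its
-- length exceeds 2, continue after the run
def pvRuns : List (String × Int) → List (String × List Int)
  | [] => []
  | p :: t =>
    (if 2 < ((p.2 :: (t.takeWhile (fun q => q.1 == p.1)).map (fun q => q.2)).length : Int)
     then [(p.1, p.2 :: (t.takeWhile (fun q => q.1 == p.1)).map (fun q => q.2))] else [])
    ++ pvRuns (t.dropWhile (fun q => q.1 == p.1))
termination_by l => l.length
decreasing_by
  have := List.length_dropWhile_le (p := fun q : String × Int => q.1 == p.1) (l := t)
  simp only [List.length_cons]
  omega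

def find_identical_alt (ciphered : String) (word_length : Int) : List (String × List Int) :=
  let keyed := PySem.List.sorted2
      ((PySem.List.pyRange 0 (PySem.Str.len ciphered - word_length + 1) 1).map
        (fun i => (PySem.Str.slice ciphered (some i) (some (i + word_length)), i)))
      (fun p => p.1) (fun p => p.2) false
  let groups := pvRuns keyed
  -- g[1][0]: every kept group holds ≥ 3 positions, so Python's g[1][0] is exact as pyGetD g.2 0 0
  PySem.List.sorted2 groups (fun g => -(PySem.List.len g.2)) (fun g => PySem.List.pyGetD g.2 0 0) false

-- ===== PRECONDITION & SPEC =====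
def Spec_find_identical (ciphered : String) (word_length : Int) (out : List (String × List Int)) : Prop := out = find_identical_alt ciphered word_length
instance (ciphered : String) (word_length : Int) (out : List (String × List Int)) : Decidable (Spec_find_identical ciphered word_length out) := by unfold Spec_find_identical; infer_instance

-- ===== CLAIM (what is proved, stated in full; the proofs are below) =====
def Claim_equal_find_identical : Prop := ∀ (ciphered : String) (word_length : Int), Dom_find_identical ciphered word_length → Spec_find_identical ciphered word_length (find_identical ciphered word_length)

-- ===== LEMMAS AND PROOFS =====

-- abbreviations for the shared data
def pvSeg (c : String) (L i : Int) : String := PySem.Str.slice c (some i) (some (i + L))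
def pvR (c : String) (L : Int) : List Int := PySem.List.pyRange 0 (PySem.Str.len c - L + 1) 1
def pvP (c : String) (L : Int) : List (String × Int) := (pvR c L).map (fun i => (pvSeg c L i, i))
def pvSg (c : String) (L : Int) : List String := PySem.Set.ofList ((pvP c L).map (fun q => q.1))
def pvSd (c : String) (L : Int) : List String := PySem.List.sorted (pvSg c L) (fun s => s) false
def pvF (c : String) (L : Int) (s : String) : String × List Int :=
  (s, ((pvP c L).filter (fun q => q.1 == s)).map (fun q => q.2))
def pvRep (c : String) (L : Int) : List (String × List Int) :=
  ((pvSg c L).map (pvF c L)).filter (fun item => PySem.List.len item.2 > 2)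
def pvGrps (c : String) (L : Int) : List (String × List Int) :=
  ((pvSd c L).map (pvF c L)).filter (fun item => PySem.List.len item.2 > 2)
def pvKY (c : String) (L : Int) : List (String × Int) :=
  (pvSd c L).flatMap (fun s => (pvP c L).filter (fun q => q.1 == s))

-- the boolean lexicographic comparators the two sorted2 calls use, and their Prop orders
def pvBf2 (a b : String × Int) : Bool :=
  decide (a.1 < b.1) || (!decide (b.1 < a.1) && decide (a.2 < b.2))
def pvS2 (a b : String × Int) : Prop := a.1 < b.1 ∨ (¬ b.1 < a.1 ∧ a.2 < b.2)
def pvBfG (a b : String × List Int) : Bool :=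
  decide (-(PySem.List.len a.2) < -(PySem.List.len b.2)) ||
    (!decide (-(PySem.List.len b.2) < -(PySem.List.len a.2)) &&
      decide (PySem.List.pyGetD a.2 0 0 < PySem.List.pyGetD b.2 0 0))
def pvSG (a b : String × List Int) : Prop :=
  PySem.List.len b.2 < PySem.List.len a.2 ∨
    (PySem.List.len a.2 = PySem.List.len b.2 ∧ PySem.List.pyGetD a.2 0 0 < PySem.List.pyGetD b.2 0 0)

-- generic: inserting x into an S-pairwise list stays S-pairwise when the comparator decides S
lemma pv_pairwise_insertBy {α : Type} (S : α → α → Prop) (bf : α → α → Bool)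
    (htr : ∀ a b c, S a b → S b c → S a c) (x : α) (acc : List α)
    (hP : acc.Pairwise S)
    (h1 : ∀ y ∈ acc, bf x y = true → S x y)
    (h2 : ∀ y ∈ acc, bf x y = false → S y x) :
    (PySem.List.insertBy bf x acc).Pairwise S := by
  induction acc with
  | nil => simp [PySem.List.insertBy]
  | cons y ys ih =>
    rcases List.pairwise_cons.mp hP with ⟨hy, hys⟩
    rw [show PySem.List.insertBy bf x (y :: ys)
          = if bf x y = true then x :: y :: ys else y :: PySem.List.insertBy bf x ys from rfl]
    by_cases hb : bf x y = true
    · simp only [hb, if_true]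
      refine List.pairwise_cons.mpr ⟨fun z hz => ?_, hP⟩
      rcases List.mem_cons.mp hz with rfl | hz'
      · exact h1 z (by simp) hb
      · exact htr x y z (h1 y (by simp) hb) (hy z hz')
    · have hb' : bf x y = false := by simpa using hb
      simp only [hb]
      refine List.pairwise_cons.mpr ⟨fun z hz => ?_, ?_⟩
      · rcases (PySem.List.mem_insertBy bf x z ys).mp hz with rfl | hz'
        · exact h2 y (by simp) hb'
        · exact hy z hz'
      · exact ih hys (fun z hz hbz => h1 z (by simp [hz]) hbz)
          (fun z hz hbz => h2 z (by simp [hz]) hbz)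

-- generic: a foldl of insertBy with a comparator total for S yields an S-pairwise list
lemma pv_pairwise_foldl_insertBy {α : Type} (S : α → α → Prop) (bf : α → α → Bool)
    (htr : ∀ a b c, S a b → S b c → S a c)
    (h1 : ∀ a b, bf a b = true → S a b)
    (h2 : ∀ a b, bf a b = false → S b a)
    (xs acc : List α) (hP : acc.Pairwise S) :
    (xs.foldl (fun acc x => PySem.List.insertBy bf x acc) acc).Pairwise S := by
  induction xs generalizing acc with
  | nil => simpa using hP
  | cons x xs ih =>
    simp only [List.foldl_cons]
    exact ih _ (pv_pairwise_insertBy S bf htr x acc hP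
      (fun y _ hb => h1 x y hb) (fun y _ hb => h2 x y hb))

-- uniqueness: two pairwise-asymmetrically-ordered permutations of each other are equal
lemma pv_eq_of_perm_of_pairwise {α : Type} (S : α → α → Prop)
    (hasymm : ∀ a b, S a b → ¬ S b a) :
    ∀ {l₁ l₂ : List α}, l₁.Perm l₂ → l₁.Pairwise S → l₂.Pairwise S → l₁ = l₂ := by
  intro l₁
  induction l₁ with
  | nil => intro l₂ hperm _ _; exact (hperm.nil_eq).symm ▸ rfl
  | cons a t ih =>
    intro l₂ hperm h1 h2
    cases l₂ with
    | nil => exact absurd hperm.symm.nil_eq (by simp)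
    | cons b t₂ =>
      rcases List.pairwise_cons.mp h1 with ⟨ha, ht⟩
      rcases List.pairwise_cons.mp h2 with ⟨hb, ht₂⟩
      by_cases hab : a = b
      · subst hab
        have := hperm.cons_inv
        rw [ih this ht ht₂]
      · have hamem : a ∈ b :: t₂ := hperm.mem_iff.mp (by simp)
        have hat₂ : a ∈ t₂ := by rcases List.mem_cons.mp hamem with h | h; exact absurd h hab; exact h
        have hbmem : b ∈ a :: t := hperm.symm.mem_iff.mp (by simp)
        have hbt : b ∈ t := by
          rcases List.mem_cons.mp hbmem with h | h; exact absurd h.symm hab; exact h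
        exact absurd (ha b hbt) (hasymm b a (hb a hat₂))

-- partition: concatenating the key-filtered blocks over the distinct keys is a permutation
lemma pv_perm_flatMap_filter {α : Type} (key : α → String) :
    ∀ (ks : List String) (l : List α), ks.Nodup → (∀ p ∈ l, key p ∈ ks) →
      (ks.flatMap (fun s => l.filter (fun q => key q == s))).Perm l := by
  intro ks
  induction ks with
  | nil =>
    intro l _ hcov
    cases l with
    | nil => simp
    | cons p t => exact absurd (hcov p (by simp)) (by simp)
  | cons k ks ih =>
    intro l hnd hcov
    rcases List.nodup_cons.mp hnd with ⟨hknot, hnd'⟩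
    simp only [List.flatMap_cons]
    have htail : ∀ s ∈ ks, l.filter (fun q => key q == s)
        = (l.filter (fun q => !(key q == k))).filter (fun q => key q == s) := by
      intro s hs
      rw [List.filter_filter]
      refine (List.filter_congr fun q _ => ?_).symm
      by_cases hq : key q == s
      · have hqk : key q ≠ k := by
          intro h
          exact hknot (by rw [← h, eq_of_beq hq]; exact hs)
        simp [hq, hqk]
      · simp [hq]
    have hrw : (ks.flatMap (fun s => l.filter (fun q => key q == s)))
        = ks.flatMap (fun s => (l.filter (fun q => !(key q == k))).filter (fun q => key q == s)) :=
      List.flatMap_congr (fun s hs => htail s hs)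
    rw [hrw]
    have hperm := ih (l.filter (fun q => !(key q == k))) hnd' (by
      intro p hp
      rcases List.mem_filter.mp hp with ⟨hpl, hpk⟩
      have := hcov p hpl
      rcases List.mem_cons.mp this with h | h
      · exact absurd (beq_iff_eq.mpr h) (by simpa using hpk)
      · exact h)
    refine (List.Perm.append_left _ hperm).trans ?_
    exact List.filter_append_perm (fun q => key q == k) l

-- pairwise of a flatMap from blockwise and crosswise pairwise
lemma pv_pairwise_flatMap {κ α : Type} (S : α → α → Prop) (Rk : κ → κ → Prop)
    (ks : List κ) (B : κ → List α) (hk : ks.Pairwise Rk)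
    (hblock : ∀ s ∈ ks, (B s).Pairwise S)
    (hcross : ∀ s t, Rk s t → ∀ p ∈ B s, ∀ q ∈ B t, S p q) :
    (ks.flatMap B).Pairwise S := by
  induction ks with
  | nil => simp
  | cons s ks ih =>
    rcases List.pairwise_cons.mp hk with ⟨hs, hk'⟩
    simp only [List.flatMap_cons]
    refine List.pairwise_append.mpr ⟨hblock s (by simp), ?_, ?_⟩
    · exact ih hk' (fun t ht => hblock t (by simp [ht]))
    · intro p hp q hq
      rcases List.mem_flatMap.mp hq with ⟨t, ht, hqt⟩
      exact hcross s t (hs t ht) p hp q hqt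

lemma pv_takeWhile_append_of_all {α : Type} (P : α → Bool) (l₁ l₂ : List α)
    (h : ∀ x ∈ l₁, P x = true) :
    (l₁ ++ l₂).takeWhile P = l₁ ++ l₂.takeWhile P := by
  induction l₁ with
  | nil => simp
  | cons x t ih =>
    simp only [List.cons_append, List.takeWhile_cons, h x (by simp), if_true]
    rw [ih (fun y hy => h y (by simp [hy]))]

lemma pv_dropWhile_append_of_all {α : Type} (P : α → Bool) (l₁ l₂ : List α)
    (h : ∀ x ∈ l₁, P x = true) :
    (l₁ ++ l₂).dropWhile P = l₂.dropWhile P := by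
  induction l₁ with
  | nil => simp
  | cons x t ih =>
    simp only [List.cons_append, List.dropWhile_cons, h x (by simp), if_true]
    exact ih (fun y hy => h y (by simp [hy]))

lemma pv_takeWhile_eq_nil {α : Type} (P : α → Bool) (l : List α)
    (h : ∀ x ∈ l, P x = false) : l.takeWhile P = [] := by
  cases l with
  | nil => simp
  | cons x t => simp [h x (by simp)]

lemma pv_dropWhile_eq_self {α : Type} (P : α → Bool) (l : List α)
    (h : ∀ x ∈ l, P x = false) : l.dropWhile P = l := by
  cases l with
  | nil => simp
  | cons x t => simp [h x (by simp)]

lemma pv_pyGetD_cons (a : Int) (t : List Int) : PySem.List.pyGetD (a :: t) 0 0 = a := by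
  simp [PySem.List.pyGetD, PySem.List.pyGet?, PySem.List.pyIdx?]

-- the run scan of a flatMap over distinct keys with nonempty uniform blocks
lemma pv_runs_flatMap (ks : List String) (B : String → List (String × Int))
    (hk : ks.Pairwise (fun s t => s ≠ t))
    (hne : ∀ s ∈ ks, B s ≠ [])
    (hfst : ∀ s ∈ ks, ∀ p ∈ B s, p.1 = s) :
    pvRuns (ks.flatMap B)
      = (ks.map (fun s => (s, (B s).map (fun q => q.2)))).filter
          (fun item => PySem.List.len item.2 > 2) := by
  
  induction ks with
  | nil => simp [pvRuns]
  | cons s ks ih =>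
    rcases List.pairwise_cons.mp hk with ⟨hs, hk'⟩
    obtain ⟨p, tl, hB⟩ : ∃ p tl, B s = p :: tl := by
      cases hBs : B s with
      | nil => exact absurd hBs (hne s (by simp))
      | cons p tl => exact ⟨p, tl, rfl⟩
    have hp1 : p.1 = s := hfst s (by simp) p (by rw [hB]; simp)
    have htl : ∀ q ∈ tl, (q.1 == p.1) = true := by
      intro q hq
      have : q.1 = s := hfst s (by simp) q (by rw [hB]; simp [hq])
      simp [this, hp1]
    have hrest : ∀ q ∈ ks.flatMap B, (q.1 == p.1) = false := by
      intro q hq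
      rcases List.mem_flatMap.mp hq with ⟨t, ht, hqt⟩
      have hq1 : q.1 = t := hfst t (by simp [ht]) q hqt
      have hts : s ≠ t := hs t ht
      simp [hq1, hp1]
      exact fun h => hts h.symm
    have hih := ih hk' (fun t ht => hne t (by simp [ht]))
      (fun t ht q hq => hfst t (by simp [ht]) q hq)
    simp only [List.flatMap_cons, hB, List.cons_append]
    rw [pvRuns]
    rw [pv_takeWhile_append_of_all _ _ _ htl, pv_takeWhile_eq_nil _ _ hrest,
        pv_dropWhile_append_of_all _ _ _ htl, pv_dropWhile_eq_self _ _ hrest, hih]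
    simp only [List.append_nil, List.map_cons, List.filter_cons, hp1, hB]
    by_cases hc : 2 ≤ tl.length
    · simp [hc, PySem.List.len]
    · simp [hc, PySem.List.len]

-- first positions of the distinct segments, in first-occurrence order, are increasing
lemma pv_firstpos_pairwise (l : List Int) (f : Int → String) (h : l.Pairwise (· < ·)) :
    (PySem.Set.ofList (l.map f)).Pairwise
      (fun s t => PySem.List.pyGetD (l.filter (fun i => f i == s)) 0 0
                    < PySem.List.pyGetD (l.filter (fun i => f i == t)) 0 0) := by
  
  revert h
  induction l using List.reverseRecOn with
  | nil => intro _; simp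
  | append_singleton l x ih =>
    intro h
    obtain ⟨hl, -, hcross⟩ := List.pairwise_append.mp h
    have hlt : ∀ y ∈ l, y < x := fun y hy => hcross y hy x (by simp)
    have IH := ih hl
    have hmem_ne : ∀ s ∈ PySem.Set.ofList (l.map f), l.filter (fun i => f i == s) ≠ [] := by
      intro s hs
      have hs' : s ∈ l.map f := (PySem.Set.mem_ofList _ _).mp hs
      rcases List.mem_map.mp hs' with ⟨i, hi, rfl⟩
      intro hemp
      have : i ∈ l.filter (fun j => f j == f i) := List.mem_filter.mpr ⟨hi, by simp⟩
      rw [hemp] at this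
      simp at this
    have hhead : ∀ s : String, l.filter (fun i => f i == s) ≠ [] →
        PySem.List.pyGetD ((l ++ [x]).filter (fun i => f i == s)) 0 0
          = PySem.List.pyGetD (l.filter (fun i => f i == s)) 0 0 := by
      intro s hne'
      rw [List.filter_append]
      cases hfe : l.filter (fun i => f i == s) with
      | nil => exact absurd hfe hne'
      | cons a t => rw [List.cons_append, pv_pyGetD_cons, pv_pyGetD_cons]
    rw [List.map_append, List.map_cons, List.map_nil, PySem.Set.ofList_append_singleton]
    by_cases hx : f x ∈ PySem.Set.ofList (l.map f)
    · have hset : PySem.Set.add (PySem.Set.ofList (l.map f)) (f x)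
          = PySem.Set.ofList (l.map f) := by simp [PySem.Set.add, hx]
      rw [hset]
      refine IH.imp_of_mem ?_
      intro s t hsS htS hR
      rw [hhead s (hmem_ne s hsS), hhead t (hmem_ne t htS)]
      exact hR
    · have hset : PySem.Set.add (PySem.Set.ofList (l.map f)) (f x)
          = PySem.Set.ofList (l.map f) ++ [f x] := by simp [PySem.Set.add, hx]
      rw [hset]
      have hfreshnil : l.filter (fun i => f i == f x) = [] := by
        refine List.filter_eq_nil_iff.mpr (fun i hi hbeq => ?_)
        exact hx ((PySem.Set.mem_ofList _ _).mpr (List.mem_map.mpr ⟨i, hi, eq_of_beq hbeq⟩))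
      refine List.pairwise_append.mpr ⟨?_, by simp, ?_⟩
      · refine IH.imp_of_mem ?_
        intro s t hsS htS hR
        rw [hhead s (hmem_ne s hsS), hhead t (hmem_ne t htS)]
        exact hR
      · intro s hsS t htx
        have ht : t = f x := by simpa using htx
        subst ht
        have hxblk : (l ++ [x]).filter (fun i => f i == f x) = [x] := by
          rw [List.filter_append, hfreshnil]
          simp
        rw [hxblk, pv_pyGetD_cons, hhead s (hmem_ne s hsS)]
        cases hfe : l.filter (fun i => f i == s) with
        | nil => exact absurd hfe (hmem_ne s hsS)
        | cons a t' =>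
          rw [pv_pyGetD_cons]
          have : a ∈ l := (List.mem_filter.mp (hfe ▸ List.mem_cons_self ..)).1
          exact hlt a this

-- A's stable reverse sort of a list with strictly increasing secondary key is lexicographically strict
lemma pv_sorted_rev_stable_pairwise {α : Type} (k1 k2 : α → Int) (xs : List α)
    (h : xs.Pairwise (fun a b => k2 a < k2 b)) :
    (PySem.List.sorted xs k1 true).Pairwise
      (fun a b => k1 b < k1 a ∨ (k1 a = k1 b ∧ k2 a < k2 b)) := by
  
  revert h
  induction xs using List.reverseRecOn with
  | nil =>
    intro _
    have : PySem.List.sorted ([] : List α) k1 true = [] := rfl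
    rw [this]
    exact List.Pairwise.nil
  | append_singleton xs x ih =>
    intro h
    obtain ⟨hxs, -, hcross⟩ := List.pairwise_append.mp h
    have hlt : ∀ y ∈ xs, k2 y < k2 x := fun y hy => hcross y hy x (by simp)
    rw [PySem.List.sorted_rev_eq_foldl_insertBy, List.foldl_append, List.foldl_cons,
        List.foldl_nil, ← PySem.List.sorted_rev_eq_foldl_insertBy]
    refine pv_pairwise_insertBy _ _ ?_ x _ (ih hxs) ?_ ?_
    · intro a b c hab hbc
      rcases hab with h1 | ⟨h1, h1'⟩ <;> rcases hbc with h2 | ⟨h2, h2'⟩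
      · exact Or.inl (by omega)
      · exact Or.inl (by omega)
      · exact Or.inl (by omega)
      · exact Or.inr ⟨h1.trans h2, lt_trans h1' h2'⟩
    · intro y hy hb
      exact Or.inl (of_decide_eq_true hb)
    · intro y hy hb
      have hxy : ¬ k1 y < k1 x := of_decide_eq_false hb
      have hy' : y ∈ xs := (PySem.List.mem_sorted _ _ _ _).mp hy
      rcases lt_trichotomy (k1 x) (k1 y) with h' | h' | h'
      · exact Or.inl h'
      · exact Or.inr ⟨h'.symm, hlt y hy'⟩
      · exact absurd h' hxy

-- A's port equals the stable frequency sort of the canonical repeated groups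
lemma pv_A_eq (c : String) (L : Int) :
    find_identical c L = PySem.List.sorted (pvRep c L) (fun x => PySem.List.len x.2) true := by
  
  unfold find_identical
  have hstep : (fun (d : PySem.Dict String (List Int)) (i : Int) =>
      let segment := PySem.Str.slice c (some i) (some (i + L))
      if d.contains segment then d.modify segment [] (fun v => v ++ [i])
      else d.insert segment [i])
    = (fun (d : PySem.Dict String (List Int)) (i : Int) =>
      d.modify (PySem.Str.slice c (some i) (some (i + L))) [] (fun v => v ++ [i])) := by
    funext d i
    by_cases h : d.contains (PySem.Str.slice c (some i) (some (i + L))) = true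
    · simp [h]
    · have h' : d.contains (PySem.Str.slice c (some i) (some (i + L))) = false := by
        simpa using h
      simp [h', PySem.Dict.modify, PySem.Dict.getD_of_not_contains _ _ h']
  rw [hstep]
  have hD2 : (PySem.List.pyRange 0 (PySem.Str.len c - L + 1) 1).foldl
      (fun (d : PySem.Dict String (List Int)) i =>
        d.modify (PySem.Str.slice c (some i) (some (i + L))) [] (fun v => v ++ [i]))
      PySem.Dict.empty
    = (pvP c L).foldl (fun d p => d.modify p.1 [] (fun v => v ++ [p.2])) PySem.Dict.empty := by
    rw [pvP, pvR, List.foldl_map]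
    rfl
  rw [hD2]
  have hkeys : ((pvP c L).foldl (fun d p => d.modify p.1 [] (fun v => v ++ [p.2]))
      PySem.Dict.empty).keys = pvSg c L := by
    rw [PySem.Dict.keys_foldl_modify_key (pvP c L) (fun p => p.1) []
          (fun _ p => (fun v => v ++ [p.2])) PySem.Dict.empty]
    rfl
  have hnd : ((pvP c L).foldl (fun d p => d.modify p.1 [] (fun v => v ++ [p.2]))
      PySem.Dict.empty).keys.Nodup := by
    rw [hkeys]
    exact PySem.Set.nodup_ofList _
  have hitems : ((pvP c L).foldl (fun d p => d.modify p.1 [] (fun v => v ++ [p.2]))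
      PySem.Dict.empty).items = (pvSg c L).map (pvF c L) := by
    rw [PySem.Dict.items_eq_map_keys _ hnd [], hkeys]
    refine List.map_congr_left (fun k _ => ?_)
    rw [PySem.Dict.getD_foldl_modify_append]
    simp [pvF, PySem.Dict.getD_empty]
  simp only [hitems]
  rfl


lemma pv_bf2_trans (a b c : String × Int) (hab : pvBf2 b a = false)
    (hbc : pvBf2 c b = false) : pvBf2 c a = false := by
  simp only [pvBf2, Bool.or_eq_false_iff, Bool.and_eq_false_iff, decide_eq_false_iff_not,
    Bool.not_eq_false', decide_eq_true_eq] at hab hbc ⊢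
  obtain ⟨h1, h2⟩ := hab
  obtain ⟨g1, g2⟩ := hbc
  refine ⟨fun hca => h1 (lt_of_le_of_lt (not_lt.mp g1) hca), ?_⟩
  rcases h2 with h2 | h2
  · exact Or.inl (lt_of_lt_of_le h2 (not_lt.mp g1))
  · rcases g2 with g2 | g2
    · exact Or.inl (lt_of_le_of_lt (not_lt.mp h1) g2)
    · exact Or.inr (by omega)

lemma pv_bf2_asymm (a b : String × Int) (h : pvBf2 a b = true) : pvBf2 b a = false := by
  simp only [pvBf2, Bool.or_eq_true, Bool.and_eq_true, Bool.not_eq_true',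
    decide_eq_true_eq, decide_eq_false_iff_not] at h
  simp only [pvBf2, Bool.or_eq_false_iff, Bool.and_eq_false_iff, decide_eq_false_iff_not,
    Bool.not_eq_false', decide_eq_true_eq]
  rcases h with h | ⟨h1, h2⟩
  · exact ⟨lt_asymm h, Or.inl h⟩
  · exact ⟨h1, Or.inr (by omega)⟩

lemma pv_bf2_upgrade (a b : String × Int) (h : pvBf2 b a = false) (hne : a.2 ≠ b.2) :
    pvS2 a b := by
  simp only [pvBf2, Bool.or_eq_false_iff, Bool.and_eq_false_iff, decide_eq_false_iff_not,
    Bool.not_eq_false', decide_eq_true_eq] at h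
  obtain ⟨h1, h2⟩ := h
  rcases h2 with h2 | h2
  · exact Or.inl h2
  · exact Or.inr ⟨h1, by omega⟩

lemma pv_S2_asymm : ∀ a b, pvS2 a b → ¬ pvS2 b a := by
  intro a b h h'
  rcases h with h | ⟨h, h2⟩ <;> rcases h' with g | ⟨g, g2⟩
  · exact lt_asymm h g
  · exact g h
  · exact h g
  · omega

lemma pv_bfG_trans (a b c : String × List Int) (hab : pvBfG b a = false)
    (hbc : pvBfG c b = false) : pvBfG c a = false := by
  simp only [pvBfG, Bool.or_eq_false_iff, Bool.and_eq_false_iff, decide_eq_false_iff_not,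
    Bool.not_eq_false', decide_eq_true_eq] at hab hbc ⊢
  omega

lemma pv_bfG_asymm (a b : String × List Int) (h : pvBfG a b = true) : pvBfG b a = false := by
  simp only [pvBfG, Bool.or_eq_true, Bool.and_eq_true, Bool.not_eq_true',
    decide_eq_true_eq, decide_eq_false_iff_not] at h
  simp only [pvBfG, Bool.or_eq_false_iff, Bool.and_eq_false_iff, decide_eq_false_iff_not,
    Bool.not_eq_false', decide_eq_true_eq]
  omega

lemma pv_bfG_upgrade (a b : String × List Int) (h : pvBfG b a = false)
    (hne : PySem.List.pyGetD a.2 0 0 ≠ PySem.List.pyGetD b.2 0 0) : pvSG a b := by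
  simp only [pvBfG, Bool.or_eq_false_iff, Bool.and_eq_false_iff, decide_eq_false_iff_not,
    Bool.not_eq_false', decide_eq_true_eq] at h
  unfold pvSG
  omega

lemma pv_SG_asymm : ∀ a b, pvSG a b → ¬ pvSG b a := by
  intro a b h h'
  unfold pvSG at h h'
  omega

-- B's port equals the (-len, firstpos) sort of the same groups listed along sorted segments
lemma pv_B_eq (c : String) (L : Int) :
    find_identical_alt c L
      = PySem.List.sorted2 (pvGrps c L) (fun g => -(PySem.List.len g.2))
          (fun g => PySem.List.pyGetD g.2 0 0) false := by
  
  have hPpair : (pvP c L).Pairwise (fun a b => a.2 < b.2) := by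
    rw [pvP]
    refine List.pairwise_map.mpr ?_
    rw [pvR]
    exact (PySem.List.pairwise_lt_pyRange_one _ _)
  have hkeyedpair : (PySem.List.sorted2 (pvP c L) (fun p => p.1) (fun p => p.2) false).Pairwise
      (fun a b => pvBf2 b a = false) := by
    rw [show PySem.List.sorted2 (pvP c L) (fun p => p.1) (fun p => p.2) false
          = (pvP c L).foldl (fun acc x => PySem.List.insertBy pvBf2 x acc) [] from rfl]
    exact pv_pairwise_foldl_insertBy (fun a b => pvBf2 b a = false) pvBf2
      (fun a b c' hab hbc => pv_bf2_trans a b c' hab hbc)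
      (fun a b h => pv_bf2_asymm a b h) (fun a b h => h) _ _ List.Pairwise.nil
  have hne2 : (PySem.List.sorted2 (pvP c L) (fun p => p.1) (fun p => p.2) false).Pairwise
      (fun a b : String × Int => a.2 ≠ b.2) := by
    exact (List.Perm.pairwise_iff (fun h => Ne.symm h) (PySem.List.sorted2_perm _ _ _ _)).mpr
      (hPpair.imp (fun h => by omega))
  have hkeyedS2 : (PySem.List.sorted2 (pvP c L) (fun p => p.1) (fun p => p.2) false).Pairwise pvS2 :=
    (hkeyedpair.and hne2).imp (fun h => pv_bf2_upgrade _ _ h.1 h.2)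
  have hKYpair : (pvKY c L).Pairwise pvS2 := by
    rw [pvKY]
    refine pv_pairwise_flatMap pvS2 (fun s t : String => s < t) _ _ ?_ ?_ ?_
    · rw [pvSd, pvSg]
      exact PySem.List.sorted_ofList_pairwise_lt _
    · intro s _
      refine (hPpair.filter _).imp_of_mem ?_
      intro p q hp hq hlt
      have hp1 : p.1 = s := eq_of_beq (List.mem_filter.mp hp).2
      have hq1 : q.1 = s := eq_of_beq (List.mem_filter.mp hq).2
      exact Or.inr ⟨by rw [hp1, hq1]; exact lt_irrefl s, hlt⟩
    · intro s t hst p hp q hq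
      have hp1 : p.1 = s := eq_of_beq (List.mem_filter.mp hp).2
      have hq1 : q.1 = t := eq_of_beq (List.mem_filter.mp hq).2
      exact Or.inl (by rw [hp1, hq1]; exact hst)
  have hKYperm : (pvKY c L).Perm (pvP c L) := by
    rw [pvKY]
    refine pv_perm_flatMap_filter (fun q : String × Int => q.1) _ _ ?_ ?_
    · exact ((PySem.List.sorted_perm (pvSg c L) (fun s => s) false).nodup_iff).mpr
        (PySem.Set.nodup_ofList _)
    · intro p hp
      rw [pvSd]
      exact (PySem.List.mem_sorted _ _ _ _).mpr
        ((PySem.Set.mem_ofList _ _).mpr (List.mem_map.mpr ⟨p, hp, rfl⟩))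
  have hkeyed_eq : PySem.List.sorted2 (pvP c L) (fun p => p.1) (fun p => p.2) false = pvKY c L :=
    pv_eq_of_perm_of_pairwise pvS2 pv_S2_asymm
      ((PySem.List.sorted2_perm _ _ _ _).trans hKYperm.symm) hkeyedS2 hKYpair
  have hknd : (pvSd c L).Pairwise (fun s t => s ≠ t) := by
    rw [pvSd, pvSg]
    exact (PySem.List.sorted_ofList_pairwise_lt _).imp (fun h => ne_of_lt h)
  have hkne : ∀ s ∈ pvSd c L, (pvP c L).filter (fun q => q.1 == s) ≠ [] := by
    intro s hs
    rw [pvSd] at hs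
    have hs' : s ∈ (pvP c L).map (fun q => q.1) :=
      (PySem.Set.mem_ofList _ _).mp ((PySem.List.mem_sorted _ _ _ _).mp hs)
    rcases List.mem_map.mp hs' with ⟨p, hp, rfl⟩
    intro hemp
    have : p ∈ (pvP c L).filter (fun q => q.1 == p.1) := List.mem_filter.mpr ⟨hp, by simp⟩
    rw [hemp] at this
    simp at this
  have hfst : ∀ s ∈ pvSd c L, ∀ p ∈ (pvP c L).filter (fun q => q.1 == s), p.1 = s := by
    intro s _ p hp
    exact eq_of_beq (List.mem_filter.mp hp).2
  have hruns : pvRuns (pvKY c L) = pvGrps c L := by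
    rw [pvKY, pv_runs_flatMap (pvSd c L) (fun s => (pvP c L).filter (fun q => q.1 == s))
      hknd hkne hfst]
    rfl
  show PySem.List.sorted2
      (pvRuns (PySem.List.sorted2 (pvP c L) (fun p => p.1) (fun p => p.2) false))
      (fun g => -(PySem.List.len g.2)) (fun g => PySem.List.pyGetD g.2 0 0) false = _
  rw [hkeyed_eq, hruns]

lemma pv_rep_perm_grps (c : String) (L : Int) : (pvGrps c L).Perm (pvRep c L) := by
  
  exact ((PySem.List.sorted_perm (pvSg c L) (fun s => s) false).map (pvF c L)).filter _

lemma pv_rep_firstpos_pairwise (c : String) (L : Int) :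
    (pvRep c L).Pairwise (fun a b => PySem.List.pyGetD a.2 0 0 < PySem.List.pyGetD b.2 0 0) := by
  
  have hblk : ∀ s, ((pvP c L).filter (fun q => q.1 == s)).map (fun q => q.2)
      = (pvR c L).filter (fun i => pvSeg c L i == s) := by
    intro s
    simp [pvP, List.filter_map, List.map_map, Function.comp_def]
  have hSg : pvSg c L = PySem.Set.ofList ((pvR c L).map (pvSeg c L)) := by
    simp [pvSg, pvP, List.map_map, Function.comp_def]
  have hG := pv_firstpos_pairwise (pvR c L) (pvSeg c L)
    (by rw [pvR]; exact PySem.List.pairwise_lt_pyRange_one _ _)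
  refine List.Pairwise.filter _ ?_
  refine List.pairwise_map.mpr ?_
  rw [hSg]
  refine hG.imp ?_
  intro s t hst
  show PySem.List.pyGetD ((pvF c L s).2) 0 0 < PySem.List.pyGetD ((pvF c L t).2) 0 0
  simp only [pvF]
  rw [hblk s, hblk t]
  exact hst

lemma pv_main (c : String) (L : Int) : find_identical c L = find_identical_alt c L := by
  
  rw [pv_A_eq, pv_B_eq]
  have hperm : (PySem.List.sorted (pvRep c L) (fun x => PySem.List.len x.2) true).Perm
      (PySem.List.sorted2 (pvGrps c L) (fun g => -(PySem.List.len g.2))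
        (fun g => PySem.List.pyGetD g.2 0 0) false) :=
    (PySem.List.sorted_perm _ _ _).trans
      (((pv_rep_perm_grps c L).symm).trans (PySem.List.sorted2_perm _ _ _ _).symm)
  have hA : (PySem.List.sorted (pvRep c L) (fun x => PySem.List.len x.2) true).Pairwise pvSG := by
    have := pv_sorted_rev_stable_pairwise (fun g => PySem.List.len g.2)
      (fun g => PySem.List.pyGetD g.2 0 0) (pvRep c L) (pv_rep_firstpos_pairwise c L)
    exact this.imp (fun h => h)
  have hBpair : (PySem.List.sorted2 (pvGrps c L) (fun g => -(PySem.List.len g.2))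
      (fun g => PySem.List.pyGetD g.2 0 0) false).Pairwise (fun a b => pvBfG b a = false) := by
    rw [show PySem.List.sorted2 (pvGrps c L) (fun g => -(PySem.List.len g.2))
          (fun g => PySem.List.pyGetD g.2 0 0) false
        = (pvGrps c L).foldl (fun acc x => PySem.List.insertBy pvBfG x acc) [] from rfl]
    exact pv_pairwise_foldl_insertBy (fun a b => pvBfG b a = false) pvBfG
      (fun a b c' hab hbc => pv_bfG_trans a b c' hab hbc)
      (fun a b h => pv_bfG_asymm a b h) (fun a b h => h) _ _ List.Pairwise.nil
  have hBne : (PySem.List.sorted2 (pvGrps c L) (fun g => -(PySem.List.len g.2))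
      (fun g => PySem.List.pyGetD g.2 0 0) false).Pairwise (fun a b =>
        PySem.List.pyGetD a.2 0 0 ≠ PySem.List.pyGetD b.2 0 0) :=
    (List.Perm.pairwise_iff (fun h => Ne.symm h)
        ((PySem.List.sorted2_perm _ _ _ _).trans (pv_rep_perm_grps c L))).mpr
      ((pv_rep_firstpos_pairwise c L).imp (fun h => by omega))
  have hB : (PySem.List.sorted2 (pvGrps c L) (fun g => -(PySem.List.len g.2))
      (fun g => PySem.List.pyGetD g.2 0 0) false).Pairwise pvSG :=
    (hBpair.and hBne).imp (fun h => pv_bfG_upgrade _ _ h.1 h.2)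
  exact pv_eq_of_perm_of_pairwise pvSG pv_SG_asymm hperm hA hB

-- ===== VERDICT (by name: the statement is the Claim_ definition above) =====
theorem find_identical_spec : Claim_equal_find_identical := by
  unfold Claim_equal_find_identical
  intro ciphered word_length _
  unfold Spec_find_identical
  exact pv_main ciphered word_length
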